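-- pv_equiv track=rewrite | github.com/orest-d/idtools | idtools/__init__.py | id_to_list
-- ===== SOURCE A (Python) =====
-- def is_all_capital(s):
--     if len(s):
--         return all(x.isupper() or (not x.isalpha()) for x in s)
--     else:
--         return True
--
-- def id_to_list(text):
--     l = []
--     s = ""
--     isac = is_all_capital(text)
--
--     for c in text:
--         if not c.isalnum() or (not isac and c.isupper()):
--             if len(s):
--                 l.append(s)
--                 s = ""
--         if not c.isalnum():
--             continue
--         s += c
--     if len(s):
--         l.append(s)
--     return l
-- ===== SOURCE B (Python) =====
-- def is_all_capital(s):
--     if len(s):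
--         return all(x.isupper() or (not x.isalpha()) for x in s)
--     else:
--         return True
--
-- def id_to_list(text):
--     isac = is_all_capital(text)
--     parts = [' ' if not c.isalnum()
--              else (' ' + c if (not isac and c.isupper()) else c)
--              for c in text]
--     return ''.join(parts).split()
-- ===== Notes on version B (the rewrite author's own statement) =====
-- stated objective: simpler
-- what changed: Replaces A's stateful word-accumulator loop (manual flush of the pending word on each boundary and at the end) with a one-pass comprehension that inserts space separators before/instead of boundary characters and lets str.split() cut and collapse them into the word list.
import Mathlib
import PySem

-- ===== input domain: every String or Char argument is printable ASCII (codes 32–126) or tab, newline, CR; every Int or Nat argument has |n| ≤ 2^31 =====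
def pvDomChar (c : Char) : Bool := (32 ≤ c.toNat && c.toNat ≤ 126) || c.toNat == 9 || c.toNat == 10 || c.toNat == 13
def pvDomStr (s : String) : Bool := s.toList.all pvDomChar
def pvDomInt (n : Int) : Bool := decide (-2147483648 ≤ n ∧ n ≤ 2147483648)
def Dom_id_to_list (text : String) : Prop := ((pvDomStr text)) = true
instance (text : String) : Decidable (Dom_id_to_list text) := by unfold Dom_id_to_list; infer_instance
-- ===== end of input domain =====

-- B replaces A's manual word-accumulator flush logic by inserting space separators
-- in one comprehension and letting str.split() cut the words (objective: simpler).

-- ===== PORT A =====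
-- shared module helper is_all_capital, ported once and used by both ports
def is_all_capital (s : String) : Bool :=
  if s.toList.length ≠ 0 then
    s.toList.all (fun x => PySem.Chars.isupper x || !PySem.Chars.isalpha x)
  else true

-- the body of A's `for c in text` loop, over state (l, s); words kept as List Char
def idStepA (isac : Bool) (st : List (List Char) × List Char) (c : Char) :
    List (List Char) × List Char :=
  let st1 :=
    if !PySem.Chars.isalnum c || (!isac && PySem.Chars.isupper c) then
      (if st.2.length ≠ 0 then (st.1 ++ [st.2], ([] : List Char)) else st)
    else st
  if !PySem.Chars.isalnum c then st1 else (st1.1, st1.2 ++ [c])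

def id_to_list (text : String) : List String :=
  let isac := is_all_capital text
  let r := text.toList.foldl (idStepA isac) ([], [])
  (if r.2.length ≠ 0 then r.1 ++ [r.2] else r.1).map String.ofList

-- ===== PORT B =====
-- the per-character transform of B's comprehension
def idCharB (isac : Bool) (c : Char) : List Char :=
  if !PySem.Chars.isalnum c then [' ']
  else if !isac && PySem.Chars.isupper c then [' ', c]
  else [c]

def id_to_list_alt (text : String) : List String :=
  let isac := is_all_capital text
  PySem.Str.split₀ (String.ofList (text.toList.flatMap (idCharB isac)))

-- ===== PRECONDITION & SPEC =====
def Spec_id_to_list (text : String) (out : List String) : Prop := out = id_to_list_alt text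
instance (text : String) (out : List String) : Decidable (Spec_id_to_list text out) := by unfold Spec_id_to_list; infer_instance

-- ===== CLAIM (what is proved, stated in full; the proofs are below) =====
def Claim_equal_id_to_list : Prop := ∀ (text : String), Dom_id_to_list text → Spec_id_to_list text (id_to_list text)

-- ===== LEMMAS AND PROOFS =====

-- proof-only helper: A's end-of-loop flush of the pending word
def flushA (st : List (List Char) × List Char) : List (List Char) :=
  if st.2.length ≠ 0 then st.1 ++ [st.2] else st.1

-- split₀.go's word accumulator `acc` only ever gets prepended (reversed) to the result
theorem split0_go_acc (ts : List Char) (cur : List Char) (acc : List (List Char)) :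
    PySem.Chars.split₀.go ts cur acc = acc.reverse ++ PySem.Chars.split₀.go ts cur [] := by
  induction ts generalizing cur acc with
  | nil => simp [PySem.Chars.split₀.go]; split <;> simp
  | cons c rest ih =>
    rw [PySem.Chars.split₀.go, PySem.Chars.split₀.go]
    split
    · split
      · exact ih _ _
      · rw [ih _ [cur.reverse], ih _ (cur.reverse :: acc)]; simp
    · exact ih _ _

theorem alnum_not_space (c : Char) (h : PySem.Chars.isalnum c = true) :
    PySem.Chars.isspace c = false := by
  simp [PySem.Chars.isalnum, PySem.Chars.isalpha, PySem.Chars.isdigit, PySem.Chars.isupper,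
    PySem.Chars.islower, Char.le_def, UInt32.le_iff_toNat_le] at h
  simp only [PySem.Chars.isspace, Bool.or_eq_false_iff, Bool.and_eq_false_iff,
    decide_eq_false_iff_not]
  omega

theorem space_is_space : PySem.Chars.isspace ' ' = true := by decide

-- the main loop invariant: A's flushed fold state equals split₀.go on B's transformed stream
theorem main_inv (isac : Bool) (cs : List Char) :
    ∀ (l : List (List Char)) (s : List Char), (∀ c ∈ s, PySem.Chars.isalnum c = true) →
    flushA (cs.foldl (idStepA isac) (l, s))
      = l ++ PySem.Chars.split₀.go (cs.flatMap (idCharB isac)) s.reverse [] := by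
  induction cs with
  | nil =>
    intro l s _
    rw [List.foldl_nil, List.flatMap_nil, PySem.Chars.split₀.go]
    by_cases hse : s = []
    · simp [hse, flushA]
    · simp [hse, flushA, List.length_eq_zero_iff, List.isEmpty_iff]
  | cons c rest ih =>
    intro l s hs
    rw [List.foldl_cons, List.flatMap_cons]
    by_cases hal : PySem.Chars.isalnum c = true
    · have hns : PySem.Chars.isspace c = false := alnum_not_space c hal
      have hsc : ∀ x ∈ s ++ [c], PySem.Chars.isalnum x = true := by
        intro x hx
        rcases List.mem_append.1 hx with h | h
        · exact hs x h
        · exact (List.mem_singleton.1 h) ▸ hal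
      by_cases hup : (!isac && PySem.Chars.isupper c) = true
      · -- flush, then start a new word with c; transform is [' ', c]
        rw [show idCharB isac c = [' ', c] by simp [idCharB, hal, hup]]
        rw [show ([' ', c] ++ rest.flatMap (idCharB isac))
              = ' ' :: c :: rest.flatMap (idCharB isac) from rfl]
        rw [PySem.Chars.split₀.go, if_pos space_is_space]
        by_cases hse : s = []
        · rw [show idStepA isac (l, s) c = (l, [c]) by simp [idStepA, hal, hup, hse]]
          rw [if_pos (by simp [hse]), PySem.Chars.split₀.go, if_neg (by simp [hns])]
          exact ih l [c] (by simp [hal])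
        · rw [show idStepA isac (l, s) c = (l ++ [s], [c]) by
            simp [idStepA, hal, hup, List.length_eq_zero_iff, hse]]
          rw [if_neg (by simp [List.isEmpty_iff, hse]), PySem.Chars.split₀.go,
            if_neg (by simp [hns])]
          rw [split0_go_acc _ [c] [s.reverse.reverse]]
          rw [ih (l ++ [s]) [c] (by simp [hal])]
          simp
      · -- ordinary alnum char: appended to the current word; transform is [c]
        have hup' : (!isac && PySem.Chars.isupper c) = false := by simpa using hup
        rw [show idCharB isac c = [c] by simp [idCharB, hal, hup']]
        rw [show idStepA isac (l, s) c = (l, s ++ [c]) by simp [idStepA, hal, hup']]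
        rw [show ([c] ++ rest.flatMap (idCharB isac)) = c :: rest.flatMap (idCharB isac) from rfl]
        rw [PySem.Chars.split₀.go, if_neg (by simp [hns])]
        have := ih l (s ++ [c]) hsc
        simpa using this
    · -- non-alnum: flush and skip the char; transform is [' ']
      have hal' : PySem.Chars.isalnum c = false := by simpa using hal
      rw [show idCharB isac c = [' '] by simp [idCharB, hal']]
      rw [show ([' '] ++ rest.flatMap (idCharB isac)) = ' ' :: rest.flatMap (idCharB isac) from rfl]
      rw [PySem.Chars.split₀.go, if_pos space_is_space]
      by_cases hse : s = []
      · rw [show idStepA isac (l, s) c = (l, []) by simp [idStepA, hal', hse]]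
        rw [if_pos (by simp [hse])]
        exact ih l [] (by simp)
      · rw [show idStepA isac (l, s) c = (l ++ [s], []) by
          simp [idStepA, hal', List.length_eq_zero_iff, hse]]
        rw [if_neg (by simp [List.isEmpty_iff, hse])]
        rw [split0_go_acc _ [] [s.reverse.reverse]]
        rw [ih (l ++ [s]) [] (by simp)]
        simp

-- ===== VERDICT (by name: the statement is the Claim_ definition above) =====
theorem id_to_list_spec : Claim_equal_id_to_list := by
  intro text _
  show id_to_list text = id_to_list_alt text
  unfold id_to_list id_to_list_alt PySem.Str.split₀ PySem.Chars.split₀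
  simp only [String.toList_ofList]
  have := main_inv (is_all_capital text) text.toList [] [] (by simp)
  rw [flushA] at this
  simp only [this]
  simp
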